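-- pv_equiv track=rewrite | github.com/Opsimathy/IT5003 | Finals/IT5003 25S1/IT5003 25S1 Final Code.py | ICPCProblem
-- ===== SOURCE A (Python) =====
-- def ICPCProblem(s: str) -> bool:
--     if len(s) % 4:
--         return False
--     stack = []
--     for i in s:
--         stack.append(i)
--         if len(stack) >= 4 and stack[-4:] == ['i', 'c', 'p', 'c']:
--             stack.pop()
--             stack.pop()
--             stack.pop()
--             stack.pop()
--     return not len(stack)
-- ===== SOURCE B (Python) =====
-- def ICPCProblem(s: str) -> bool:
--     i = s.find('icpc')
--     if i == -1:
--         return not s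
--     return ICPCProblem(s[:i] + s[i+4:])
-- ===== Notes on version B (the rewrite author's own statement) =====
-- stated objective: simpler
-- what changed: Replaces the one-pass stack machine (and its redundant length-mod-4 guard) with a recursive fixpoint that finds and deletes the first occurrence of the four-char pattern until none remains, then tests emptiness; equivalence holds because the pattern has no self-overlap, so the normal form is order-independent.
import Mathlib
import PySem

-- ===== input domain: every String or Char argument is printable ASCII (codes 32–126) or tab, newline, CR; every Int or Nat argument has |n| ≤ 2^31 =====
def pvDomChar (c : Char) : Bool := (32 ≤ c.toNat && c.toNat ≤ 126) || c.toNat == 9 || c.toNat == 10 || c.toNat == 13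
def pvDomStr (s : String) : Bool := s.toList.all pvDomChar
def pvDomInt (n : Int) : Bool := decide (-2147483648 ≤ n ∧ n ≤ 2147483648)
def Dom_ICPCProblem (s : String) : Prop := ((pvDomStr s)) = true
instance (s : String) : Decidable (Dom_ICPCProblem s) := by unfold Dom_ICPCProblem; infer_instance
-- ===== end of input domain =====

-- B replaces A's one-pass stack machine (and its redundant length-mod-4 guard) by a recursive
-- fixpoint deleting the first occurrence of the pattern until none remains (simpler, not faster).

-- ===== PORT A =====
-- one iteration of A's loop body: append the char, pop four if the top four spell 'icpc'
def icpcStep (st : List Char) (c : Char) : List Char :=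
  if 4 ≤ (st ++ [c]).length ∧ PySem.List.slice (st ++ [c]) (some (-4)) none = ['i', 'c', 'p', 'c'] then
    ((((st ++ [c]).dropLast).dropLast).dropLast).dropLast
  else
    st ++ [c]

def ICPCProblem (s : String) : Bool :=
  if PySem.Int.mod (PySem.Str.len s) 4 ≠ 0 then false
  else
    (s.toList.foldl icpcStep []).isEmpty

-- ===== PORT B =====
-- helper for termination: deleting a found occurrence shortens the list (cited by decreasing_by)
theorem icpcAlt_dec (cs : List Char) (i : Int) (hfind : PySem.Chars.find cs ['i','c','p','c'] = i)
    (hne : ¬ i = -1) :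
    (PySem.List.slice cs none (some i) ++ PySem.List.slice cs (some (i + 4)) none).length < cs.length := by
  have h0 : 0 ≤ i := by
    have := PySem.Chars.neg_one_le_find cs ['i','c','p','c']
    omega
  have hspec := PySem.Chars.find_spec
    (show (0:Int) ≤ PySem.Chars.find cs ['i','c','p','c'] by rw [hfind]; exact h0)
  rw [hfind] at hspec
  obtain ⟨t, ht⟩ := hspec.1
  have hlen4 : i.toNat + 4 ≤ cs.length := by
    have := congrArg List.length ht
    simp at this
    omega
  rw [PySem.List.slice_to cs h0, PySem.List.slice_from cs (by omega)]
  have h4 : (i + 4).toNat = i.toNat + 4 := by omega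
  rw [h4]
  simp
  omega

def icpcAltGo (cs : List Char) : Bool :=
  if _h : PySem.Chars.find cs ['i','c','p','c'] = -1 then cs.isEmpty
  else icpcAltGo (PySem.List.slice cs none (some (PySem.Chars.find cs ['i','c','p','c'])) ++
    PySem.List.slice cs (some (PySem.Chars.find cs ['i','c','p','c'] + 4)) none)
termination_by cs.length
decreasing_by exact icpcAlt_dec cs _ rfl _h

def ICPCProblem_alt (s : String) : Bool := icpcAltGo s.toList

-- ===== PRECONDITION & SPEC =====
def Spec_ICPCProblem (s : String) (out : Bool) : Prop := out = ICPCProblem_alt s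
instance (s : String) (out : Bool) : Decidable (Spec_ICPCProblem s out) := by unfold Spec_ICPCProblem; infer_instance

-- ===== CLAIM (what is proved, stated in full; the proofs are below) =====
def Claim_equal_ICPCProblem : Prop := ∀ (s : String), Dom_ICPCProblem s → Spec_ICPCProblem s (ICPCProblem s)

-- ===== LEMMAS AND PROOFS =====

-- a suffix ending in [x] cancels on the right
theorem suffix_concat_iff (a l : List Char) (x : Char) : (a ++ [x]) <:+ (l ++ [x]) ↔ a <:+ l := by
  constructor
  · rintro ⟨t, ht⟩
    refine ⟨t, ?_⟩
    rw [← List.append_assoc] at ht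
    exact List.append_cancel_right ht
  · rintro ⟨t, rfl⟩; exact ⟨t, by simp⟩

theorem getLast?_of_suffix (a l : List Char) (h : a <:+ l) (hne : a ≠ []) :
    l.getLast? = a.getLast? := by
  obtain ⟨t, rfl⟩ := h
  exact List.getLast?_append_of_ne_nil t hne

-- A's pop condition holds exactly when 'icpc' is a suffix of the extended stack
theorem icpc_cond_iff (l : List Char) :
    (4 ≤ l.length ∧ PySem.List.slice l (some (-4)) none = ['i', 'c', 'p', 'c'])
      ↔ (['i','c','p','c'] : List Char) <:+ l := by
  rw [PySem.List.slice_from_neg_ofNat l 4 (by norm_num)]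
  constructor
  · rintro ⟨h4, hsl⟩
    exact hsl ▸ List.drop_suffix _ _
  · rintro ⟨t, rfl⟩
    constructor
    · simp
    · simp

-- if 'icpc' is not a suffix after appending, the step is a plain push
theorem icpcStep_no (st : List Char) (c : Char) (h : ¬ (['i','c','p','c'] : List Char) <:+ st ++ [c]) :
    icpcStep st c = st ++ [c] := by
  unfold icpcStep
  rw [if_neg]
  intro hc
  exact h ((icpc_cond_iff (st ++ [c])).1 hc)

-- feeding the four characters i,c,p,c to A's machine returns it to the same stack
theorem icpcStep_four (st : List Char) :
    icpcStep (icpcStep (icpcStep (icpcStep st 'i') 'c') 'p') 'c' = st := by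
  have h1 : icpcStep st 'i' = st ++ ['i'] := by
    apply icpcStep_no
    intro h
    have := getLast?_of_suffix _ _ h (by simp)
    simp at this
  have h2 : icpcStep (st ++ ['i']) 'c' = st ++ ['i', 'c'] := by
    have : (st ++ ['i']) ++ ['c'] = st ++ ['i', 'c'] := by simp
    rw [icpcStep_no _ _ ?_, this]
    rw [this]
    intro h
    have h' : (['i','c','p'] ++ ['c'] : List Char) <:+ (st ++ ['i']) ++ ['c'] := by
      simpa using h
    have h'' := (suffix_concat_iff _ _ _).1 h'
    have := getLast?_of_suffix _ _ h'' (by simp)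
    simp at this
  have h3 : icpcStep (st ++ ['i', 'c']) 'p' = st ++ ['i', 'c', 'p'] := by
    have heq : (st ++ ['i', 'c']) ++ ['p'] = st ++ ['i', 'c', 'p'] := by simp
    rw [icpcStep_no _ _ ?_, heq]
    rw [heq]
    intro h
    have := getLast?_of_suffix _ _ h (by simp)
    simp at this
  have h4 : icpcStep (st ++ ['i', 'c', 'p']) 'c' = st := by
    unfold icpcStep
    rw [if_pos]
    · have heq : (st ++ ['i', 'c', 'p']) ++ ['c'] = st ++ ['i', 'c', 'p', 'c'] := by simp
      rw [heq]
      simp [List.dropLast_append_of_ne_nil]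
    · apply (icpc_cond_iff _).2
      exact ⟨st, by simp⟩
  rw [h1, h2, h3, h4]

theorem foldl_icpc_skip (st : List Char) (v : List Char) :
    List.foldl icpcStep st ('i' :: 'c' :: 'p' :: 'c' :: v) = List.foldl icpcStep st v := by
  simp only [List.foldl_cons]
  rw [icpcStep_four]

-- a string with no 'icpc' passes through A's machine untouched
theorem foldl_icpc_no_infix : ∀ (s u : List Char),
    ¬ (['i','c','p','c'] : List Char) <:+: (u ++ s) → List.foldl icpcStep u s = u ++ s := by
  intro s
  induction s with
  | nil => intro u _; simp
  | cons c s' ih =>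
    intro u h
    have hstep : icpcStep u c = u ++ [c] := by
      apply icpcStep_no
      intro hsuf
      exact h (hsuf.isInfix.trans ⟨[], s', by simp⟩)
    rw [List.foldl_cons, hstep]
    have := ih (u ++ [c]) (by simpa using h)
    simpa using this

-- the stack length mod 4 is invariant under A's machine
theorem icpcStep_len_mod (st : List Char) (c : Char) :
    (icpcStep st c).length % 4 = (st.length + 1) % 4 := by
  unfold icpcStep
  split_ifs with h
  · have h4 := h.1
    simp at h4 ⊢
    omega
  · simp

theorem foldl_icpc_len_mod : ∀ (s st : List Char),
    (List.foldl icpcStep st s).length % 4 = (st.length + s.length) % 4 := by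
  intro s
  induction s with
  | nil => intro st; simp
  | cons c s' ih =>
    intro st
    rw [List.foldl_cons]
    have h1 := ih (icpcStep st c)
    have h2 := icpcStep_len_mod st c
    simp only [List.length_cons]
    omega

-- main bridge: B's fixpoint answers whether A's machine empties the stack
theorem icpcAltGo_eq (cs : List Char) : icpcAltGo cs = (cs.foldl icpcStep []).isEmpty := by
  unfold icpcAltGo
  split_ifs with h
  · have hno : ¬ (['i','c','p','c'] : List Char) <:+: cs := by
      rw [← PySem.Chars.find_eq_neg_one_iff]
      exact h
    rw [foldl_icpc_no_infix cs [] (by simpa using hno)]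
    simp
  · set i := PySem.Chars.find cs ['i','c','p','c'] with hi
    have h0 : 0 ≤ i := by
      have := PySem.Chars.neg_one_le_find cs ['i','c','p','c']
      omega
    have hspec := PySem.Chars.find_spec (show (0:Int) ≤ PySem.Chars.find cs ['i','c','p','c'] from hi ▸ h0)
    rw [← hi] at hspec
    obtain ⟨t, ht⟩ := hspec.1
    have hcs : cs = cs.take i.toNat ++ (['i','c','p','c'] ++ t) := by
      rw [ht, List.take_append_drop]
    have h4 : (i + 4).toNat = i.toNat + 4 := by omega
    have htt : t = cs.drop (i.toNat + 4) := by
      have h2 := congrArg (List.drop 4) ht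
      simpa [List.drop_drop, Nat.add_comm] using h2
    rw [PySem.List.slice_to cs h0, PySem.List.slice_from cs (by omega), h4, ← htt]
    rw [icpcAltGo_eq (cs.take i.toNat ++ t)]
    congr 1
    conv_rhs => rw [hcs]
    rw [List.foldl_append, List.foldl_append]
    exact (foldl_icpc_skip _ t).symm
termination_by cs.length
decreasing_by
  rw [← hi]
  have hl := congrArg List.length ht
  simp at hl
  simp only [List.length_append, List.length_take]
  omega

-- ===== VERDICT (by name: the statement is the Claim_ definition above) =====
theorem ICPCProblem_spec : Claim_equal_ICPCProblem := by
  intro s _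
  unfold Spec_ICPCProblem ICPCProblem ICPCProblem_alt
  rw [icpcAltGo_eq]
  split_ifs with h
  · -- len % 4 ≠ 0: the stack cannot be empty
    have hmod : PySem.Int.mod (PySem.Str.len s) 4 = ((s.toList.length % 4 : Nat) : Int) := by
      simp [PySem.Str.len]
    have hne : s.toList.length % 4 ≠ 0 := by
      intro h0
      apply h
      rw [hmod, h0]
      simp
    cases hE : (s.toList.foldl icpcStep []).isEmpty
    · rfl
    · exfalso
      have hlen0 : (s.toList.foldl icpcStep []).length = 0 := by
        simpa [List.isEmpty_iff_length_eq_zero] using hE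
      have hmod4 := foldl_icpc_len_mod s.toList []
      simp only [List.length_nil, Nat.zero_add] at hmod4
      omega
  · rfl
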